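-- pv_equiv track=rewrite | github.com/SSKYAJI/ACG | acg/index/cochange.py | _parse_commits
-- ===== SOURCE A (Python) =====
-- def _parse_commits(raw: str) -> list[set[str]]:
--     commits: list[set[str]] = []
--     current: set[str] = set()
--     for line in raw.splitlines():
--         line = line.strip()
--         if line == "COMMIT":
--             if current:
--                 commits.append(current)
--             current = set()
--         elif line:
--             current.add(line)
--     if current:
--         commits.append(current)
--     return commits
-- ===== SOURCE B (Python) =====
-- def _split_groups(lines):
--     # split the line list into groups delimited by "COMMIT" lines,
--     # built back-to-front over the reversed line list
--     groups = [[]]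
--     for ln in reversed(lines):
--         if ln == "COMMIT":
--             groups.insert(0, [])
--         else:
--             groups[0].insert(0, ln)
--     return groups
--
--
-- def _parse_commits(raw: str) -> list[set[str]]:
--     lines = [ln.strip() for ln in raw.splitlines()]
--     out = []
--     for g in _split_groups(lines):
--         s = {ln for ln in g if ln}
--         if s:
--             out.append(s)
--     return out
-- ===== Notes on version B (the rewrite author's own statement) =====
-- stated objective: alternative
-- what changed: Replaces A's single-pass running-set-with-flush loop by a two-phase structure: a recursive splitter that partitions the stripped lines into COMMIT-delimited groups, then a pass turning each group into its set of non-empty lines and keeping the non-empty sets.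
import Mathlib
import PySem

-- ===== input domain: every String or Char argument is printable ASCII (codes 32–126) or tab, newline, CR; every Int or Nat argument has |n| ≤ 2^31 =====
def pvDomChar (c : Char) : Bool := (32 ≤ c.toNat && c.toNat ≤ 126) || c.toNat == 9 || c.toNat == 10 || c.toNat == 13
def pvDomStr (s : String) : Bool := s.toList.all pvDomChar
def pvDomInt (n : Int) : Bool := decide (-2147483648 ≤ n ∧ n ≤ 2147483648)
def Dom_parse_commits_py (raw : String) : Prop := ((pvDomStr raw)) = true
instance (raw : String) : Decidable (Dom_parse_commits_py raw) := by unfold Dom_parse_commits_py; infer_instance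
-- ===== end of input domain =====

-- B re-implements A's single-pass flush loop as split-into-COMMIT-groups then build-sets; same result, same cost.

-- ===== PORT A =====
-- one loop step of A: strip, flush on "COMMIT", otherwise add non-empty lines to the current set
def pvAStep (st : List (List String) × PySem.Set String) (line : String) :
    List (List String) × PySem.Set String :=
  let line := PySem.Str.strip line
  if line = "COMMIT" then
    ((if st.2 ≠ [] then st.1 ++ [st.2] else st.1), PySem.Set.empty)
  else if line ≠ "" then (st.1, PySem.Set.add st.2 line)
  else st

def parse_commits_py (raw : String) : List (List String) :=
  let st := (PySem.Str.splitlines raw).foldl pvAStep ([], PySem.Set.empty)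
  if st.2 ≠ [] then st.1 ++ [st.2] else st.1

-- ===== PORT B =====
-- splitter: partition the lines into "COMMIT"-delimited groups, built back-to-front
def pvSplitGroups : List String → List (List String)
  | [] => [[]]
  | head :: rest =>
    let groups := pvSplitGroups rest
    if head = "COMMIT" then [] :: groups
    else (head :: groups.headI) :: groups.tail

def parse_commits_py_alt (raw : String) : List (List String) :=
  let lines := (PySem.Str.splitlines raw).map PySem.Str.strip
  (pvSplitGroups lines).foldl
    (fun out g =>
      let s := PySem.Set.ofList (g.filter (fun ln => ln != ""))
      if s ≠ [] then out ++ [s] else out) []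

-- ===== PRECONDITION & SPEC =====
def Spec_parse_commits_py (raw : String) (out : List (List String)) : Prop := out = parse_commits_py_alt raw
instance (raw : String) (out : List (List String)) : Decidable (Spec_parse_commits_py raw out) := by unfold Spec_parse_commits_py; infer_instance

-- ===== CLAIM (what is proved, stated in full; the proofs are below) =====
def Claim_equal_parse_commits_py : Prop := ∀ (raw : String), Dom_parse_commits_py raw → Spec_parse_commits_py raw (parse_commits_py raw)

-- ===== LEMMAS AND PROOFS =====

-- proof-side characterisation of B's second pass, group by group
def pvBuild : List String → List (List String) → List (List String)
  | _, [] => []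
  | cur, g :: gs =>
    (if (g.filter (fun ln => ln != "")).foldl PySem.Set.add cur ≠ []
      then [(g.filter (fun ln => ln != "")).foldl PySem.Set.add cur] else []) ++ pvBuild [] gs

theorem pvSplitGroups_ne_nil (ls : List String) : pvSplitGroups ls ≠ [] := by
  cases ls with
  | nil => simp [pvSplitGroups]
  | cons h t => simp only [pvSplitGroups]; split <;> simp

theorem pvBfold (groups : List (List String)) (acc : List (List String)) :
    groups.foldl
      (fun out g =>
        let s := PySem.Set.ofList (g.filter (fun ln => ln != ""))
        if s ≠ [] then out ++ [s] else out) acc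
    = acc ++ pvBuild [] groups := by
  induction groups generalizing acc with
  | nil => simp [pvBuild]
  | cons g gs ih =>
    simp only [List.foldl_cons]
    rw [ih]
    simp only [pvBuild, PySem.Set.ofList_eq_foldl]
    split <;> simp

theorem pvAloop (lines : List String) (acc : List (List String)) (cur : PySem.Set String) :
    (let st := lines.foldl pvAStep (acc, cur);
      if st.2 ≠ [] then st.1 ++ [st.2] else st.1)
    = acc ++ pvBuild cur (pvSplitGroups (lines.map PySem.Str.strip)) := by
  induction lines generalizing acc cur with
  | nil =>
    simp only [List.foldl_nil, List.map_nil, pvSplitGroups, pvBuild, List.filter_nil,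
      List.foldl_nil]
    split <;> simp_all
  | cons l ls ih =>
    simp only [List.foldl_cons, List.map_cons, pvSplitGroups, pvAStep]
    by_cases hC : PySem.Str.strip l = "COMMIT"
    · rw [if_pos hC, if_pos hC, ih]
      simp only [pvBuild, List.filter_nil, List.foldl_nil]
      split <;> simp_all
    · obtain ⟨g, gs, hgg⟩ : ∃ g gs, pvSplitGroups (ls.map PySem.Str.strip) = g :: gs := by
        cases h : pvSplitGroups (ls.map PySem.Str.strip) with
        | nil => exact absurd h (pvSplitGroups_ne_nil _)
        | cons a b => exact ⟨a, b, rfl⟩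
      rw [if_neg hC, if_neg hC]
      by_cases hE : PySem.Str.strip l = ""
      · rw [if_neg (not_not_intro hE), ih, hgg]
        have hf : (PySem.Str.strip l != "") = false := by simp [hE]
        simp [pvBuild, hf]
      · rw [if_pos hE, ih, hgg]
        have hf : (PySem.Str.strip l != "") = true := by simp [hE]
        simp [pvBuild, hf, List.foldl_cons]

-- ===== VERDICT (by name: the statement is the Claim_ definition above) =====
theorem parse_commits_py_spec : Claim_equal_parse_commits_py := by
  intro raw _
  unfold Spec_parse_commits_py parse_commits_py parse_commits_py_alt
  rw [pvAloop, pvBfold]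
  have h := pvSplitGroups_ne_nil ((PySem.Str.splitlines raw).map PySem.Str.strip)
  cases hg : pvSplitGroups ((PySem.Str.splitlines raw).map PySem.Str.strip) with
  | nil => exact absurd hg h
  | cons g gs => simp [pvBuild]
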